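-- pv_equiv track=rewrite | github.com/ak1376/PRS_Portability | snakemake_scripts/reconstruct_transformer.py | _choose_windows
-- ===== SOURCE A (Python) =====
-- def _choose_windows(L_total: int, window_len: int) -> list[tuple[int, int]]:
--     if window_len <= 0:
--         raise ValueError("window_len must be > 0")
--     if window_len >= L_total:
--         return [(0, L_total)]
--     starts = list(range(0, L_total, window_len))
--     windows = []
--     for s in starts:
--         e = s + window_len
--         if e <= L_total:
--             windows.append((s, e))
--         else:
--             windows.append((L_total - window_len, L_total))
--             break
--     return sorted(set(windows))
-- ===== SOURCE B (Python) =====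
-- def _choose_windows(L_total: int, window_len: int) -> list[tuple[int, int]]:
--     if window_len <= 0:
--         raise ValueError("window_len must be > 0")
--     if window_len >= L_total:
--         return [(0, L_total)]
--     # Build back-to-front: start from the clamped final window, then walk the
--     # aligned window ends downwards, and reverse at the end.
--     out = [(L_total - window_len, L_total)]
--     e = L_total - L_total % window_len   # last aligned end
--     if e == L_total:                     # final window already covers [e-wl, e)
--         e -= window_len
--     while e >= window_len:
--         out.append((e - window_len, e))
--         e -= window_len
--     out.reverse()
--     return out
-- ===== Notes on version B (the rewrite author's own statement) =====
-- stated objective: alternative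
-- what changed: B builds the window list back-to-front: it starts from the clamped final window, walks the aligned window ends downward appending each full window, and reverses once at the end, so A's start-list scan, in-loop overshoot branch/break and final sorted(set(...)) pass all disappear.
import Mathlib
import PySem

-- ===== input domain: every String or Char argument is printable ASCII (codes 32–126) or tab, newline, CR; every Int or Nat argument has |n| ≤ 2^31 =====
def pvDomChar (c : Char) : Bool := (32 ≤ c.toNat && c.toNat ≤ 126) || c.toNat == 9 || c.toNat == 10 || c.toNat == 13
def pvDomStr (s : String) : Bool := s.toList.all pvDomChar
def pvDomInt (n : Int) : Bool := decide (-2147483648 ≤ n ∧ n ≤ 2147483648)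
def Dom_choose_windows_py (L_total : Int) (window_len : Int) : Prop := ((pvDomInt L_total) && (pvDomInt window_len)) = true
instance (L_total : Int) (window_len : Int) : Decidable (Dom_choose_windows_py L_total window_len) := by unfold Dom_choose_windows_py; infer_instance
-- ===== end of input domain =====

-- B builds the window list back-to-front from the clamped final window and reverses once, replacing A's start-scan with break and final sorted(set(...)).

-- ===== PORT A =====
-- the for-loop over `starts` with its break: recursion over the remaining starts, accumulator `windows`
def chooseWindowsLoopA (L_total : Int) (window_len : Int) : List Int → List (Int × Int) → List (Int × Int)
  | [], windows => windows
  | s :: rest, windows =>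
      if s + window_len ≤ L_total then
        chooseWindowsLoopA L_total window_len rest (windows ++ [(s, s + window_len)])
      else
        windows ++ [(L_total - window_len, L_total)]   -- append the clamped tail, then break

def choose_windows_py (L_total : Int) (window_len : Int) : List (Int × Int) :=
  if window_len ≤ 0 then []   -- Python raises ValueError here; excluded by Pre_
  else if window_len ≥ L_total then [(0, L_total)]
  else
    let starts := PySem.List.pyRange 0 L_total window_len
    let windows := chooseWindowsLoopA L_total window_len starts []
    PySem.List.sorted2 (PySem.Set.ofList windows) (fun w => w.1) (fun w => w.2)

-- ===== PORT B =====
-- B's while-loop over the aligned ends, walking downwards; the Nat fuel only makes the recursion total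
def chooseWindowsLoopB (window_len : Int) : Nat → Int → List (Int × Int) → List (Int × Int)
  | 0, _, out => out
  | n + 1, e, out =>
      if e ≥ window_len then
        chooseWindowsLoopB window_len n (e - window_len) (out ++ [(e - window_len, e)])
      else out

def choose_windows_py_alt (L_total : Int) (window_len : Int) : List (Int × Int) :=
  if window_len ≤ 0 then []   -- Python raises ValueError here; excluded by Pre_
  else if window_len ≥ L_total then [(0, L_total)]
  else
    let out := [(L_total - window_len, L_total)]
    let e0 := L_total - PySem.Int.mod L_total window_len
    let e1 := if e0 = L_total then e0 - window_len else e0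
    (chooseWindowsLoopB window_len (L_total.toNat + 1) e1 out).reverse

-- ===== PRECONDITION & SPEC =====
-- Pre_ excludes exactly window_len ≤ 0, where Python A raises ValueError.
def Pre_choose_windows_py (L_total : Int) (window_len : Int) : Prop := 0 < window_len
instance (L_total : Int) (window_len : Int) : Decidable (Pre_choose_windows_py L_total window_len) := by unfold Pre_choose_windows_py; infer_instance
def pvWitness_choose_windows_py : Int × Int := (10, 3)
def Spec_choose_windows_py (L_total : Int) (window_len : Int) (out : List (Int × Int)) : Prop := out = choose_windows_py_alt L_total window_len
instance (L_total : Int) (window_len : Int) (out : List (Int × Int)) : Decidable (Spec_choose_windows_py L_total window_len out) := by unfold Spec_choose_windows_py; infer_instance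

-- ===== CLAIM (what is proved, stated in full; the proofs are below) =====
def Claim_equal_choose_windows_py : Prop := ∀ (L_total : Int) (window_len : Int), Dom_choose_windows_py L_total window_len → Pre_choose_windows_py L_total window_len → Spec_choose_windows_py L_total window_len (choose_windows_py L_total window_len)

-- ===== LEMMAS AND PROOFS =====

-- the full windows both programs build in the main case, indexed by i ∈ [a, b)
def fullW (wl a b : Int) : List (Int × Int) :=
  (PySem.List.pyRange a b 1).map (fun i => (wl * i, wl * (i + 1)))

theorem fullW_nil (wl a b : Int) (h : b ≤ a) : fullW wl a b = [] := by
  unfold fullW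
  rw [PySem.List.pyRange_one_eq_nil h]
  rfl

theorem fullW_cons (wl a b : Int) (h : a < b) :
    fullW wl a b = (wl * a, wl * (a + 1)) :: fullW wl (a + 1) b := by
  unfold fullW
  rw [PySem.List.pyRange_one_cons h]
  rfl

theorem fullW_snoc (wl b : Int) (h : 0 < b) :
    fullW wl 0 b = fullW wl 0 (b - 1) ++ [(wl * (b - 1), wl * b)] := by
  unfold fullW
  have hb : PySem.List.pyRange 0 b 1 = PySem.List.pyRange 0 (b - 1) 1 ++ [b - 1] := by
    have h' := PySem.List.pyRange_one_succ_right (a := 0) (b := b - 1) (by omega)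
    rw [show b - 1 + 1 = b from by omega] at h'
    exact h'
  rw [hb, List.map_append, List.map_cons, List.map_nil,
    show b - 1 + 1 = b from by omega]

-- A's loop on the remaining starts [wl*j, wl*(j+1), …), characterised in closed form
theorem loopA_spec (L wl : Int) (hwl : 0 < wl) (hL : wl < L)
    (q r : Int) (hqr : L = wl * q + r) (hr0 : 0 ≤ r) (hrw : r < wl) :
    ∀ (n : Nat) (j : Int) (acc : List (Int × Int)),
      j + n = q + (if r = 0 then 0 else 1) →
      chooseWindowsLoopA L wl ((PySem.List.pyRange j (j + n) 1).map (fun i => wl * i)) acc =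
        acc ++ fullW wl j q ++ (if r ≠ 0 ∧ j ≤ q then [(L - wl, L)] else []) := by
  intro n
  induction n with
  | zero =>
      intro j acc hN
      rw [show j + ((0:Nat):Int) = j by simp, PySem.List.pyRange_one_eq_nil (le_refl j)]
      by_cases hrz : r = 0
      · simp only [hrz, if_pos rfl] at hN
        push_cast at hN
        simp [chooseWindowsLoopA, fullW_nil wl j q (by omega), hrz]
      · simp only [if_neg hrz] at hN
        push_cast at hN
        have hj : ¬ (j ≤ q) := by omega
        simp [chooseWindowsLoopA, fullW_nil wl j q (by omega), hj]
  | succ n ih =>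
      intro j acc hN
      push_cast at hN
      have hjN : j < j + ((n:Int) + 1) := by omega
      rw [show j + (((n:Nat) + 1 : Nat) : Int) = j + ((n:Int) + 1) by push_cast; ring]
      rw [PySem.List.pyRange_one_cons hjN, List.map_cons]
      have hjq : j ≤ q := by
        by_cases hrz : r = 0 <;> simp [hrz] at hN <;> omega
      by_cases hfull : wl * j + wl ≤ L
      · -- full window (s, s + wl); continue with the rest
        have hjlt : j < q := by
          by_contra hc
          have hjq' : j = q := by omega
          nlinarith
        simp only [chooseWindowsLoopA, hfull, if_pos]
        rw [show j + ((n:Int) + 1) = (j + 1) + ((n:Nat):Int) by push_cast; ring]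
        rw [ih (j + 1) (acc ++ [(wl * j, wl * j + wl)]) (by push_cast; omega)]
        rw [fullW_cons wl j q hjlt]
        have he : wl * (j + 1) = wl * j + wl := by ring
        simp only [he, List.append_assoc, List.cons_append, List.nil_append]
        congr 2
        by_cases hrz : r = 0 <;> simp [hrz, (by omega : j + 1 ≤ q ↔ j ≤ q)]
      · -- overshoot: append the clamped tail and break
        have hjq' : j = q := by
          by_contra hc
          have : j < q := by omega
          nlinarith
        have hrz : r ≠ 0 := by
          intro h0
          simp [h0] at hN
          omega
        simp only [chooseWindowsLoopA, hfull, if_neg, not_false_iff]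
        rw [fullW_nil wl j q (by omega)]
        simp [hrz, hjq']

-- the window list is strictly increasing in the first component
theorem windows_pairwise (L wl : Int) (hwl : 0 < wl) (hL : wl < L)
    (q r : Int) (hqr : L = wl * q + r) (hr0 : 0 ≤ r) (hrw : r < wl) :
    (fullW wl 0 q ++ (if r ≠ 0 ∧ (0:Int) ≤ q then [(L - wl, L)] else [])).Pairwise
      (fun a b => a.1 < b.1) := by
  rw [List.pairwise_append]
  refine ⟨?_, ?_, ?_⟩
  · unfold fullW
    rw [List.pairwise_map]
    refine (PySem.List.pairwise_lt_pyRange_one (a := 0) (b := q)).imp ?_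
    intro a b hab
    simpa using by nlinarith
  · split <;> simp
  · intro x hx y hy
    split at hy
    · rename_i hcond
      have hr1 : 1 ≤ r := by omega
      simp at hy
      unfold fullW at hx
      simp only [List.mem_map] at hx
      obtain ⟨i, hi, hxe⟩ := hx
      rw [PySem.List.mem_pyRange_one] at hi
      subst hxe hy
      simp only
      nlinarith [hi.1, hi.2]
    · simp at hy

-- an insertion sort of a list already strictly increasing in the primary key is the identity
theorem sorted2_eq_self (xs : List (Int × Int)) (h : xs.Pairwise (fun a b => a.1 < b.1)) :
    PySem.List.sorted2 xs (fun w => w.1) (fun w => w.2) = xs := by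
  induction xs using List.reverseRecOn with
  | nil => rfl
  | append_singleton ys x ih =>
      have hys : ys.Pairwise (fun a b => a.1 < b.1) := (List.pairwise_append.mp h).1
      have hlast : ∀ y ∈ ys, y.1 < x.1 := by
        intro y hy
        exact (List.pairwise_append.mp h).2.2 y hy x (by simp)
      have hstep : PySem.List.sorted2 (ys ++ [x]) (fun w => w.1) (fun w => w.2) =
          PySem.List.insertBy
            (fun a b => decide (a.1 < b.1) || (!decide (b.1 < a.1) && decide (a.2 < b.2))) x
            (PySem.List.sorted2 ys (fun w => w.1) (fun w => w.2)) := by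
        show List.foldl _ [] (ys ++ [x]) = _
        rw [List.foldl_append]
        rfl
      rw [hstep, ih hys]
      apply PySem.List.insertBy_of_forall_not_before
      intro y hy
      have h1 : ¬ (x.1 < y.1) := by have := hlast y hy; omega
      have h2 : y.1 < x.1 := hlast y hy
      simp [h1, h2]

-- B's downward walk from the aligned end wl*k appends the k full windows in reverse order
theorem loopB_spec (wl : Int) (hwl : 0 < wl) :
    ∀ (n : Nat) (k : Int) (out : List (Int × Int)), 0 ≤ k → k < n →
      chooseWindowsLoopB wl n (wl * k) out = out ++ (fullW wl 0 k).reverse := by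
  intro n
  induction n with
  | zero => intro k out hk0 hkn; omega
  | succ n ih =>
      intro k out hk0 hkn
      by_cases hk : k = 0
      · subst hk
        simp only [chooseWindowsLoopB]
        rw [if_neg (show ¬ (wl * (0:Int) ≥ wl) by omega), fullW_nil wl 0 0 le_rfl]
        simp
      · have hk1 : 1 ≤ k := by omega
        have hge : wl * k ≥ wl := by nlinarith
        simp only [chooseWindowsLoopB, hge, if_pos]
        have he : wl * k - wl = wl * (k - 1) := by ring
        rw [he, ih (k - 1) (out ++ [(wl * (k - 1), wl * k)]) (by omega) (by push_cast at hkn ⊢; omega)]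
        rw [fullW_snoc wl k (by omega)]
        simp

-- ===== VERDICT (by name: the statement is the Claim_ definition above) =====
theorem choose_windows_py_spec : Claim_equal_choose_windows_py := by
  intro L wl _ hpre
  unfold Spec_choose_windows_py choose_windows_py choose_windows_py_alt
  unfold Pre_choose_windows_py at hpre
  have hwl0 : ¬ (wl ≤ 0) := by omega
  simp only [hwl0, if_false]
  by_cases hge : wl ≥ L
  · simp [hge]
  · have hL : wl < L := by omega
    simp only [hge, if_false]
    set q := PySem.Int.floordiv L wl with hq
    set r := PySem.Int.mod L wl with hr
    have hqr : L = wl * q + r := by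
      have := Int.mul_fdiv_add_fmod L wl
      simp only [hq, hr, PySem.Int.floordiv, PySem.Int.mod]
      omega
    have hL0 : (0:Int) < L := hpre.trans hL
    have hr0 : 0 ≤ r := by
      simpa [hr, PySem.Int.mod] using Int.fmod_nonneg hL0.le (by omega : (0:Int) ≤ wl)
    have hrw : r < wl := by
      simpa [hr, PySem.Int.mod] using Int.fmod_lt_of_pos L (by omega : 0 < wl)
    have hq0 : 0 ≤ q := by nlinarith
    have hq1 : 1 ≤ q := by nlinarith
    have hqL : q ≤ L := by nlinarith
    set N : Int := q + (if r = 0 then 0 else 1) with hNdef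
    have hN0 : 0 ≤ N := by rw [hNdef]; split <;> omega
    -- the start list of A is the first N multiples of wl
    have hcnt : ((L - 0 + wl - 1) / wl) = N := by
      rw [hNdef]
      by_cases hrz : r = 0
      · have h1 : L - 0 + wl - 1 = (wl - 1) + wl * q := by omega
        rw [h1, Int.add_mul_ediv_left _ _ (by omega : wl ≠ 0),
          Int.ediv_eq_zero_of_lt (by omega) (by omega)]
        simp [hrz]
      · have h1 : L - 0 + wl - 1 = (r - 1) + wl * (q + 1) := by ring_nf; omega
        rw [h1, Int.add_mul_ediv_left _ _ (by omega : wl ≠ 0),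
          Int.ediv_eq_zero_of_lt (by omega) (by omega)]
        simp [hrz]
    have hstarts : PySem.List.pyRange 0 L wl =
        (PySem.List.pyRange 0 (0 + (N.toNat : Int)) 1).map (fun i => wl * i) := by
      rw [PySem.List.pyRange_of_pos 0 L (by omega : 0 < wl), if_pos hL0, hcnt]
      rw [PySem.List.pyRange_one]
      rw [List.map_map]
      rw [show (0:Int) + (N.toNat : Int) - 0 = (N.toNat : Int) by ring, Int.toNat_natCast]
      apply List.map_congr_left
      intro k _
      simp [Function.comp]
    rw [hstarts,
      loopA_spec L wl (by omega) hL q r hqr hr0 hrw N.toNat 0 [] (by push_cast; omega)]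
    have hwin := windows_pairwise L wl (by omega) hL q r hqr hr0 hrw
    have hne : ∀ (a b : Int × Int), a.1 < b.1 → a ≠ b := by
      intro a b hab h
      rw [h] at hab
      omega
    have hpw : (fullW wl 0 q ++ (if r ≠ 0 ∧ (0:Int) ≤ q then [(L - wl, L)] else [])).Pairwise (· ≠ ·) :=
      hwin.imp (fun hab => hne _ _ hab)
    have hnodup : (fullW wl 0 q ++ (if r ≠ 0 ∧ (0:Int) ≤ q then [(L - wl, L)] else [])).Nodup := hpw
    simp only [List.nil_append]
    rw [PySem.Set.ofList_eq_self_of_nodup _ hnodup, sorted2_eq_self _ hwin]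
    -- B's side: the downward walk
    by_cases hrz : r = 0
    · -- e0 = L, so the walk starts at e0 - wl = wl * (q - 1)
      have he0 : L - r = L := by omega
      rw [if_pos he0]
      have h1 : L - wl = wl * (q - 1) := by rw [hqr, hrz]; ring
      have h2 : L - r - wl = wl * (q - 1) := by rw [hqr, hrz]; ring
      have h3 : L = wl * q := by omega
      rw [h2, loopB_spec wl (by omega) (L.toNat + 1) (q - 1) _ (by omega) (by omega)]
      rw [List.reverse_append, List.reverse_reverse, List.reverse_singleton, h1, h3]
      have hsnoc := fullW_snoc wl q (by omega)
      simp [hrz, hsnoc]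
    · -- e0 = L - r = wl * q ≠ L
      have hne0 : ¬ (L - r = L) := by omega
      rw [if_neg hne0]
      have hLr : L - r = wl * q := by omega
      rw [hLr, loopB_spec wl (by omega) (L.toNat + 1) q _ (by omega) (by omega)]
      rw [List.reverse_append, List.reverse_reverse, List.reverse_singleton]
      simp [hrz, hq0]
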